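-- pv_equiv track=rewrite | github.com/EvanNingduoZhao/LeetCode | wayfair/wayfairOA/insertA.py | insertA
-- ===== SOURCE A (Python) =====
-- def insertA(s):
--     if not s:
--         return -1
--     if len(s)==0:
--         return 2
--     res=0
--     consecuACount=0
--     for i in range(0,len(s)):
--         if s[i] == 'a':
--             consecuACount+=1
--             if consecuACount==3:
--                 return -1
--         if s[i] != 'a':
--             res+=2-consecuACount
--             consecuACount=0
--     return res+2-consecuACount
-- ===== SOURCE B (Python) =====
-- def insertA(s):
--     if not s:
--         return -1
--     if 'aaa' in s:
--         return -1
--     a = sum(1 if ch == 'a' else 0 for ch in s)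
--     return 2 * (len(s) + 1) - 3 * a
-- ===== Notes on version B (the rewrite author's own statement) =====
-- stated objective: simpler
-- what changed: Replaces A's per-character accumulator loop (running consecutive-'a' counter with incremental res updates and early bail-out) by a single substring impossibility check for a run of three 'a' characters plus the closed form 2*(len(s)+1) minus three times the number of 'a' characters.
import Mathlib
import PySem

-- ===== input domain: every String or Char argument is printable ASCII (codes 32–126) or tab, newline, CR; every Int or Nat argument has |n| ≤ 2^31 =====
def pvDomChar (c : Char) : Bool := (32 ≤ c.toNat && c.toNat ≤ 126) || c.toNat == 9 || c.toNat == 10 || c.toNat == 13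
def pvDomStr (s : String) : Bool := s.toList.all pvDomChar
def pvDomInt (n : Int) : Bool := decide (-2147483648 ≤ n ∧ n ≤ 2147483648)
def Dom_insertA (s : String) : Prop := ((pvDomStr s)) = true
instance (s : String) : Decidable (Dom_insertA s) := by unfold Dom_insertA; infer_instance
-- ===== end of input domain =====

-- B replaces A's per-character accumulator loop with an 'aaa' substring check plus a
-- closed-form count formula; objective: simpler.

-- ===== PORT A =====
-- the loop: consecutive-'a' counter, early -1 on a third 'a', res += 2 - run at each non-'a'
def insertA_go : List Char → Int → Int → Int
  | [], res, consecuACount => res + 2 - consecuACount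
  | x :: xs, res, consecuACount =>
    if x = 'a' then
      if consecuACount + 1 = 3 then -1
      else insertA_go xs res (consecuACount + 1)
    else insertA_go xs (res + 2 - consecuACount) 0

def insertA (s : String) : Int :=
  if s = "" then -1           -- 'if not s: return -1'
  else if PySem.Str.len s = 0 then 2   -- dead branch in A, kept literally
  else insertA_go s.toList 0 0

-- ===== PORT B =====
def insertA_alt (s : String) : Int :=
  if s = "" then -1
  else if PySem.Str.isIn "aaa" s then -1
  else 2 * ((PySem.Str.len s : Int) + 1)
         - 3 * (s.toList.map (fun ch => if ch = 'a' then (1 : Int) else 0)).sum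

-- ===== PRECONDITION & SPEC =====
def Spec_insertA (s : String) (out : Int) : Prop := out = insertA_alt s
instance (s : String) (out : Int) : Decidable (Spec_insertA s out) := by unfold Spec_insertA; infer_instance

-- ===== CLAIM (what is proved, stated in full; the proofs are below) =====
def Claim_equal_insertA : Prop := ∀ (s : String), Dom_insertA s → Spec_insertA s (insertA s)

-- ===== LEMMAS AND PROOFS =====

-- the loop with carry c bails out iff the string starts with 3-c 'a's or contains "aaa"
def badFrom (c : Nat) (l : List Char) : Prop :=
  List.replicate (3 - c) 'a' <+: l ∨ ['a', 'a', 'a'] <:+: l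

theorem replicate_prefix_mono {c d : Nat} {l : List Char} (h : c ≤ d)
    (hp : List.replicate d 'a' <+: l) : List.replicate c 'a' <+: l := by
  refine List.IsPrefix.trans ?_ hp
  have : List.replicate d 'a' = List.replicate c 'a' ++ List.replicate (d - c) 'a' := by
    rw [← List.replicate_add]; congr 1; omega
  rw [this]; exact List.prefix_append _ _

theorem not_badFrom_nil {c : Nat} (hc : c ≤ 2) : ¬ badFrom c [] := by
  rintro (h | h)
  · have := h.length_le; simp [List.length_replicate] at this; omega
  · have := h.length_le; simp at this

theorem badFrom_two_cons_a {xs : List Char} : badFrom 2 ('a' :: xs) := by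
  left; simp [List.replicate]

theorem badFrom_cons_a {c : Nat} (hc : c ≤ 1) {xs : List Char} :
    badFrom c ('a' :: xs) ↔ badFrom (c + 1) xs := by
  constructor
  · rintro (h | h)
    · left
      have hrep : List.replicate (3 - c) 'a' = 'a' :: List.replicate (3 - (c + 1)) 'a' := by
        have : 3 - c = (3 - (c + 1)) + 1 := by omega
        rw [this, List.replicate_succ]
      rw [hrep] at h
      exact (List.cons_prefix_cons.mp h).2
    · rcases (List.infix_cons_iff.mp h) with h | h
      · have h2 : List.replicate 2 'a' <+: xs := by
          have := (List.cons_prefix_cons.mp h).2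
          simpa [List.replicate] using this
        left
        exact replicate_prefix_mono (by omega) h2
      · right; exact h
  · rintro (h | h)
    · left
      have hrep : List.replicate (3 - c) 'a' = 'a' :: List.replicate (3 - (c + 1)) 'a' := by
        have : 3 - c = (3 - (c + 1)) + 1 := by omega
        rw [this, List.replicate_succ]
      rw [hrep]
      exact List.cons_prefix_cons.mpr ⟨rfl, h⟩
    · right; exact List.infix_cons h

theorem badFrom_cons_ne {c : Nat} (hc : c ≤ 2) {x : Char} {xs : List Char} (hx : x ≠ 'a') :
    badFrom c (x :: xs) ↔ badFrom 0 xs := by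
  constructor
  · rintro (h | h)
    · exfalso
      have h3 : 1 ≤ 3 - c := by omega
      have := replicate_prefix_mono h3 h
      simp [List.replicate] at this
      exact hx this.symm
    · rcases (List.infix_cons_iff.mp h) with h | h
      · exact absurd (List.cons_prefix_cons.mp h).1.symm hx
      · exact Or.inr h
  · rintro (h | h)
    · right
      exact List.infix_cons (by simpa [List.replicate] using h.isInfix)
    · exact Or.inr (List.infix_cons h)

-- the loop returns -1 exactly on the bad inputs …
theorem go_bad (l : List Char) : ∀ (res : Int) (c : Nat), c ≤ 2 → badFrom c l →
    insertA_go l res (c : Int) = -1 := by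
  induction l with
  | nil => intro res c hc hb; exact absurd hb (not_badFrom_nil hc)
  | cons x xs ih =>
    intro res c hc hb
    by_cases hx : x = 'a'
    · subst hx
      by_cases h2 : c = 2
      · subst h2; simp [insertA_go]
      · have h3 : ¬ ((c : Int) + 1 = 3) := by omega
        rw [show insertA_go ('a' :: xs) res (c : Int) = insertA_go xs res ((c : Int) + 1) by
              simp [insertA_go, h3]]
        rw [show ((c : Int) + 1) = ((c + 1 : Nat) : Int) by push_cast; ring]
        exact ih res (c + 1) (by omega) ((badFrom_cons_a (by omega)).mp hb)
    · rw [show insertA_go (x :: xs) res (c : Int) = insertA_go xs (res + 2 - (c : Int)) 0 by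
            simp [insertA_go, hx]]
      rw [show (0 : Int) = ((0 : Nat) : Int) by simp]
      exact ih _ 0 (by omega) ((badFrom_cons_ne hc hx).mp hb)

-- … and otherwise computes res + 2·(#non-'a') + 2 - (carry + #'a')
theorem go_good (l : List Char) : ∀ (res : Int) (c : Nat), c ≤ 2 → ¬ badFrom c l →
    insertA_go l res (c : Int) =
      res + 2 * (l.countP (fun x => x ≠ 'a') : Int) + 2 - ((c : Int) + (l.count 'a' : Int)) := by
  induction l with
  | nil =>
    intro res c hc _
    simp only [insertA_go, List.countP_nil, List.count_nil]
    push_cast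
    ring
  | cons x xs ih =>
    intro res c hc hb
    by_cases hx : x = 'a'
    · subst hx
      have h2 : c ≠ 2 := fun h => hb (h ▸ badFrom_two_cons_a)
      have h3 : ¬ ((c : Int) + 1 = 3) := by omega
      rw [show insertA_go ('a' :: xs) res (c : Int) = insertA_go xs res ((c : Int) + 1) by
            simp [insertA_go, h3]]
      rw [show ((c : Int) + 1) = ((c + 1 : Nat) : Int) by push_cast; ring]
      rw [ih res (c + 1) (by omega) (fun h => hb ((badFrom_cons_a (by omega)).mpr h))]
      simp
      ring
    · rw [show insertA_go (x :: xs) res (c : Int) = insertA_go xs (res + 2 - (c : Int)) 0 by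
            simp [insertA_go, hx]]
      rw [show (0 : Int) = ((0 : Nat) : Int) by simp]
      rw [ih _ 0 (by omega) (fun h => hb ((badFrom_cons_ne hc hx).mpr h))]
      simp [hx]
      ring

theorem counts_split (l : List Char) :
    l.countP (fun x => x ≠ 'a') + l.count 'a' = l.length := by
  induction l with
  | nil => simp
  | cons x xs ih =>
    by_cases hx : x = 'a' <;>
      simp [hx] at ih ⊢ <;> omega

-- ===== VERDICT (by name: the statement is the Claim_ definition above) =====
theorem insertA_spec : Claim_equal_insertA := by
  intro s _
  unfold Spec_insertA insertA insertA_alt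
  by_cases hs : s = ""
  · simp [hs]
  · have hne : s.toList ≠ [] := by
      intro h
      exact hs (String.toList_inj.mp (by simpa using h))
    rw [if_neg hs, if_neg hs]
    have hlen0 : ¬ (PySem.Str.len s = 0) := by
      simp only [PySem.Str.len_eq]
      simpa using hne
    rw [if_neg hlen0]
    have hbad : badFrom 0 s.toList ↔ (PySem.Str.isIn "aaa" s = true) := by
      rw [PySem.Str.isIn_iff_infix]
      constructor
      · rintro (h | h)
        · simpa using h.isInfix
        · simpa using h
      · intro h; right; simpa using h
    have hz : ((0 : Nat) : Int) = (0 : Int) := by simp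
    by_cases hb : badFrom 0 s.toList
    · have hgo := go_bad s.toList 0 0 (by omega) hb
      rw [hz] at hgo
      rw [hgo, if_pos (hbad.mp hb)]
    · have hgo := go_good s.toList 0 0 (by omega) hb
      rw [hz] at hgo
      rw [hgo, if_neg (fun h => hb (hbad.mpr h))]
      have hsum : ((s.toList.map (fun ch => if ch = 'a' then (1 : Int) else 0)).sum)
          = (s.toList.countP (fun ch => ch = 'a') : Int) := by
        simpa using PySem.List.sum_map_ite_one_zero (fun ch : Char => ch = 'a') s.toList
      have hsplit := counts_split s.toList
      have hcnt : s.toList.count 'a' = s.toList.countP (fun ch => decide (ch = 'a')) := by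
        simp [List.count_eq_countP]
        apply List.countP_congr
        intro a _
        by_cases h : a = 'a' <;> simp [h]
      rw [hsum]
      simp only [PySem.Str.len_eq]
      omega
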